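-- pv_equiv track=rewrite | github.com/gisfanmachel/jupter | SM/iobjectspy/_jsuperpy/_utils.py | split_input_list_tuple_item_from_str
-- ===== SOURCE A (Python) =====
-- def split_input_list_tuple_item_from_str(value):
--     if value is None:
--         return
--     if isinstance(value, str):
--         res = list()
--         tokens = value.strip().split(",")
--         for token in tokens:
--             sub_tokens = token.split(";")
--             for sub_token in sub_tokens:
--                 sub_item = sub_token.split(":")
--                 if len(sub_item) == 2:
--                     res.append((sub_item[0].strip(), sub_item[1].strip()))
--
--         return res
--     if isinstance(value, (list, tuple)):
--         res = list()
--         for item in value: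
--             if isinstance(item, str):
--                 sub_item = item.split(":")
--                 if len(sub_item) == 2:
--                     res.append((sub_item[0].strip(), sub_item[1].strip()))
--                 elif isinstance(item, (tuple, list)):
--                     res.append(tuple(item))
--
--         return res
--     return
-- ===== SOURCE B (Python) =====
-- def split_input_list_tuple_item_from_str(value):
--     if value is None:
--         return
--     if isinstance(value, str):
--         # one character-level pass (state machine): no split calls at all
--         res = []
--         left, right, ncolon = [], [], 0
--         def flush():
--             if ncolon == 1:
--                 res.append(("".join(left).strip(), "".join(right).strip()))
--         for ch in value.strip():
--             if ch in ",;":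
--                 flush()
--                 left, right, ncolon = [], [], 0
--             elif ch == ":":
--                 ncolon += 1
--             elif ncolon == 0:
--                 left.append(ch)
--             elif ncolon == 1:
--                 right.append(ch)
--         flush()
--         return res
--     if isinstance(value, (list, tuple)):
--         res = list()
--         for item in value:
--             if isinstance(item, str):
--                 sub_item = item.split(":")
--                 if len(sub_item) == 2:
--                     res.append((sub_item[0].strip(), sub_item[1].strip()))
--                 elif isinstance(item, (tuple, list)):
--                     res.append(tuple(item))
--         return res
--     return
-- ===== Notes on version B (the rewrite author's own statement) =====
-- stated objective: alternative
-- what changed: The str branch's nested split/split/split passes are replaced by a single character-level state machine that scans the stripped string once, accumulating the left/right buffers and a colon count and emitting a pair at each delimiter when exactly one colon was seen; the None guard and the list/tuple branch are unchanged.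
import Mathlib
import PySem

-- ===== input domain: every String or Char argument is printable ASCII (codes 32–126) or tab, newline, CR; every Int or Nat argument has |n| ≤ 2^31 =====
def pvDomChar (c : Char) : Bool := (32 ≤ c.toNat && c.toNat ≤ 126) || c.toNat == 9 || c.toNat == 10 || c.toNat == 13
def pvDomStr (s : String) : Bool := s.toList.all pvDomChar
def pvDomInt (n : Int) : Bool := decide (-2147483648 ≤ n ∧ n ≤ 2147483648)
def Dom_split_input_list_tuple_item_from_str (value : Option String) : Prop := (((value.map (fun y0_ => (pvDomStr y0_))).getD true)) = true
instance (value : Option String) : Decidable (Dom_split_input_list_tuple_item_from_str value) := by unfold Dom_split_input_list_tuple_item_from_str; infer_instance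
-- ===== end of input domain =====

-- B replaces A's three nested split passes by a single character-level state machine
-- over the stripped string (left/right buffers plus a colon count, emitting at each
-- delimiter); objective: alternative, same cost.

-- ===== PORT A =====
def split_input_list_tuple_item_from_str (value : Option String) : Option (List (String × String)) :=
  match value with
  | none => none
  | some v =>
    let tokens := PySem.Chars.splitOn (PySem.Chars.strip v.toList) [',']
    some (tokens.foldl (fun res token =>
      (PySem.Chars.splitOn token [';']).foldl (fun res subToken =>
        let subItem := PySem.Chars.splitOn subToken [':']
        if subItem.length = 2 then
          res ++ [(String.ofList (PySem.Chars.strip (subItem[0]!)),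
                   String.ofList (PySem.Chars.strip (subItem[1]!)))]
        else res) res) [])

-- ===== PORT B =====
-- Source B's one-pass state machine: fold over the stripped characters carrying
-- (res, left, right, ncolon); 'flush' is Source B's flush, called at each delimiter
-- and once after the loop.
def pvFlush (res : List (String × String)) (l r : List Char) (n : Nat) : List (String × String) :=
  if n = 1 then
    res ++ [(String.ofList (PySem.Chars.strip l), String.ofList (PySem.Chars.strip r))]
  else res

def pvStep (st : List (String × String) × List Char × List Char × Nat) (ch : Char) :
    List (String × String) × List Char × List Char × Nat :=
  let (res, l, r, n) := st
  if ch = ',' ∨ ch = ';' then (pvFlush res l r n, [], [], 0)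
  else if ch = ':' then (res, l, r, n + 1)
  else if n = 0 then (res, l ++ [ch], r, n)
  else if n = 1 then (res, l, r ++ [ch], n)
  else (res, l, r, n)

def split_input_list_tuple_item_from_str_alt (value : Option String) : Option (List (String × String)) :=
  match value with
  | none => none
  | some v =>
    let st := (PySem.Chars.strip v.toList).foldl pvStep ([], [], [], 0)
    some (pvFlush st.1 st.2.1 st.2.2.1 st.2.2.2)

-- ===== PRECONDITION & SPEC =====
def Spec_split_input_list_tuple_item_from_str (value : Option String) (out : Option (List (String × String))) : Prop := out = split_input_list_tuple_item_from_str_alt value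
instance (value : Option String) (out : Option (List (String × String))) : Decidable (Spec_split_input_list_tuple_item_from_str value out) := by unfold Spec_split_input_list_tuple_item_from_str; infer_instance

-- ===== CLAIM (what is proved, stated in full; the proofs are below) =====
def Claim_equal_split_input_list_tuple_item_from_str : Prop := ∀ (value : Option String), Dom_split_input_list_tuple_item_from_str value → Spec_split_input_list_tuple_item_from_str value (split_input_list_tuple_item_from_str value)

-- ===== LEMMAS AND PROOFS =====

-- single-character split, the common shape of A's three splits
def pvSplitChar (c : Char) : List Char → List (List Char)
  | [] => [[]]
  | x :: rest =>
    let r := pvSplitChar c rest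
    if x = c then [] :: r else (x :: r.headI) :: r.tail

-- split at every ',' or ';'
def pvSplitAny : List Char → List (List Char)
  | [] => [[]]
  | c :: rest =>
    let r := pvSplitAny rest
    if c = ',' ∨ c = ';' then [] :: r else (c :: r.headI) :: r.tail

theorem pvSplitChar_ne_nil (c : Char) (cs : List Char) : pvSplitChar c cs ≠ [] := by
  cases cs <;> simp [pvSplitChar] <;> split <;> simp

theorem pvSplitAny_ne_nil (cs : List Char) : pvSplitAny cs ≠ [] := by
  cases cs <;> simp [pvSplitAny] <;> split <;> simp

theorem pv_headI_tail {α : Type} [Inhabited α] (l : List α) (h : l ≠ []) :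
    l.headI :: l.tail = l := by
  cases l with
  | nil => exact absurd rfl h
  | cons a t => rfl

theorem splitOn_go_single (c : Char) : ∀ (fuel : Nat) (l cur : List Char) (acc : List (List Char)),
    l.length < fuel →
    PySem.Chars.splitOn.go [c] fuel l cur acc =
      acc.reverse ++ (cur.reverse ++ (pvSplitChar c l).headI) :: (pvSplitChar c l).tail := by
  intro fuel
  induction fuel with
  | zero => intro l cur acc h; omega
  | succ f ih =>
    intro l cur acc h
    cases l with
    | nil => simp [PySem.Chars.splitOn.go, pvSplitChar]
    | cons x rest =>
      rw [PySem.Chars.splitOn.go]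
      by_cases hx : x = c
      · subst hx
        simp only [List.isPrefixOf, BEq.rfl, Bool.true_and, if_true, List.length_cons,
          List.length_nil, List.drop_succ_cons, List.drop_zero]
        rw [ih rest [] (cur.reverse :: acc) (by simpa using Nat.lt_of_succ_lt_succ h)]
        simp [pvSplitChar, pv_headI_tail _ (pvSplitChar_ne_nil x rest)]
      · have hbeq : ([c].isPrefixOf (x :: rest)) = false := by
          simp [List.isPrefixOf]; exact fun hh => hx hh.symm
        rw [if_neg (by simp [hbeq])]
        rw [ih rest (x :: cur) acc (by simpa using Nat.lt_of_succ_lt_succ h)]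
        simp [pvSplitChar, hx, pv_headI_tail _ (pvSplitChar_ne_nil c rest)]

theorem splitOn_single (c : Char) (cs : List Char) :
    PySem.Chars.splitOn cs [c] = pvSplitChar c cs := by
  unfold PySem.Chars.splitOn
  rw [splitOn_go_single c (cs.length + 1) cs [] [] (by omega)]
  simp [pv_headI_tail _ (pvSplitChar_ne_nil c cs)]

-- splitting on ',' and then each piece on ';' is the combined split
theorem flatMap_splitChar (cs : List Char) :
    (pvSplitChar ',' cs).flatMap (pvSplitChar ';') = pvSplitAny cs := by
  induction cs with
  | nil => simp [pvSplitChar, pvSplitAny]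
  | cons x rest ih =>
    by_cases hc : x = ','
    · subst hc
      simp [pvSplitChar, pvSplitAny, ih]
    · by_cases hs : x = ';'
      · subst hs
        obtain ⟨h0, t0, hr⟩ : ∃ h0 t0, pvSplitChar ',' rest = h0 :: t0 := by
          cases hcase : pvSplitChar ',' rest with
          | nil => exact absurd hcase (pvSplitChar_ne_nil ',' rest)
          | cons a b => exact ⟨a, b, rfl⟩
        simp only [pvSplitChar, pvSplitAny, hr, if_neg (by decide : ¬ (';' : Char) = ','),
          List.headI_cons, List.tail_cons, List.flatMap_cons, if_pos (Or.inr rfl)]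
        rw [← ih, hr]
        simp
      · obtain ⟨h0, t0, hr⟩ : ∃ h0 t0, pvSplitChar ',' rest = h0 :: t0 := by
          cases hcase : pvSplitChar ',' rest with
          | nil => exact absurd hcase (pvSplitChar_ne_nil ',' rest)
          | cons a b => exact ⟨a, b, rfl⟩
        obtain ⟨g0, s0, hg⟩ : ∃ g0 s0, pvSplitChar ';' h0 = g0 :: s0 := by
          cases hcase : pvSplitChar ';' h0 with
          | nil => exact absurd hcase (pvSplitChar_ne_nil ';' h0)
          | cons a b => exact ⟨a, b, rfl⟩
        simp only [pvSplitChar, pvSplitAny, hr, hg, if_neg hc, if_neg hs,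
          if_neg (by tauto : ¬ (x = ',' ∨ x = ';')), List.headI_cons, List.tail_cons,
          List.flatMap_cons]
        rw [← ih]
        simp [hr, hg, pvSplitChar, hs]

-- what one leaf contributes
def pvEmit (leaf : List Char) : Option (String × String) :=
  match pvSplitChar ':' leaf with
  | [a, b] => some (String.ofList (PySem.Chars.strip a), String.ofList (PySem.Chars.strip b))
  | _ => none

-- A's append-if inner loop is a filterMap over the same leaves
theorem foldl_inner (xs : List (List Char)) (init : List (String × String)) :
    xs.foldl (fun res subToken =>
      if (pvSplitChar ':' subToken).length = 2 then
        res ++ [(String.ofList (PySem.Chars.strip ((pvSplitChar ':' subToken)[0]!)),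
                 String.ofList (PySem.Chars.strip ((pvSplitChar ':' subToken)[1]!)))]
      else res) init
    = init ++ xs.filterMap pvEmit := by
  induction xs generalizing init with
  | nil => simp
  | cons x xs ih =>
    rw [List.foldl_cons, List.filterMap_cons]
    rcases hsx : pvSplitChar ':' x with _ | ⟨a, _ | ⟨b, _ | _⟩⟩
    · rw [if_neg (by simp [hsx]), ih]
      simp [pvEmit, hsx]
    · rw [if_neg (by simp [hsx]), ih]
      simp [pvEmit, hsx]
    · rw [if_pos (by simp [hsx]), ih]
      simp [pvEmit, hsx]
    · rw [if_neg (by simp [hsx]), ih]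
      simp [pvEmit, hsx]

-- B's machine as structural recursion (run) and its per-leaf kernel (procLeaf)
def pvProcLeaf : List Char → List Char → List Char → Nat → Option (String × String)
  | [], l, r, n => if n = 1 then
      some (String.ofList (PySem.Chars.strip l), String.ofList (PySem.Chars.strip r))
    else none
  | c :: p, l, r, n =>
    if c = ':' then pvProcLeaf p l r (n + 1)
    else if n = 0 then pvProcLeaf p (l ++ [c]) r n
    else if n = 1 then pvProcLeaf p l (r ++ [c]) n
    else pvProcLeaf p l r n

def pvRun : List Char → List Char → List Char → Nat → List (String × String)
  | [], l, r, n => pvFlush [] l r n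
  | c :: cs, l, r, n =>
    if c = ',' ∨ c = ';' then pvFlush [] l r n ++ pvRun cs [] [] 0
    else if c = ':' then pvRun cs l r (n + 1)
    else if n = 0 then pvRun cs (l ++ [c]) r n
    else if n = 1 then pvRun cs l (r ++ [c]) n
    else pvRun cs l r n

theorem foldl_pvStep (cs : List Char) :
    ∀ (res : List (String × String)) (l r : List Char) (n : Nat),
    (let st := cs.foldl pvStep (res, l, r, n)
     pvFlush st.1 st.2.1 st.2.2.1 st.2.2.2) = res ++ pvRun cs l r n := by
  induction cs with
  | nil =>
    intro res l r n
    simp only [List.foldl_nil, pvRun, pvFlush]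
    split <;> simp
  | cons c cs ih =>
    intro res l r n
    simp only [List.foldl_cons, pvRun, pvStep]
    split_ifs <;> rw [ih]
    simp only [pvFlush]
    split <;> simp

theorem pvProcLeaf_ge2 (p : List Char) : ∀ (l r : List Char) (n : Nat), 2 ≤ n →
    pvProcLeaf p l r n = none := by
  induction p with
  | nil => intro l r n h; simp only [pvProcLeaf]; rw [if_neg (by omega)]
  | cons c p ih =>
    intro l r n h
    simp only [pvProcLeaf]
    by_cases hc : c = ':'
    · rw [if_pos hc]; exact ih _ _ _ (by omega)
    · rw [if_neg hc, if_neg (by omega), if_neg (by omega)]; exact ih _ _ _ h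

theorem pvProcLeaf_one (p : List Char) : ∀ (l r : List Char),
    pvProcLeaf p l r 1 =
      match pvSplitChar ':' p with
      | [a] => some (String.ofList (PySem.Chars.strip l), String.ofList (PySem.Chars.strip (r ++ a)))
      | _ => none := by
  induction p with
  | nil => intro l r; simp [pvProcLeaf, pvSplitChar]
  | cons c p ih =>
    intro l r
    obtain ⟨h0, t0, hr⟩ : ∃ h0 t0, pvSplitChar ':' p = h0 :: t0 := by
      cases hcase : pvSplitChar ':' p with
      | nil => exact absurd hcase (pvSplitChar_ne_nil ':' p)
      | cons a b => exact ⟨a, b, rfl⟩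
    by_cases hc : c = ':'
    · subst hc
      have hstep : pvProcLeaf (':' :: p) l r 1 = pvProcLeaf p l r 2 := by
        simp [pvProcLeaf]
      rw [hstep, pvProcLeaf_ge2 p l r 2 (by omega)]
      simp [pvSplitChar, hr]
    · have hstep : pvProcLeaf (c :: p) l r 1 = pvProcLeaf p l (r ++ [c]) 1 := by
        simp [pvProcLeaf, hc]
      rw [hstep, ih]
      simp only [pvSplitChar, hr, if_neg hc, List.headI_cons, List.tail_cons]
      cases t0 <;> simp [hr]

theorem pvProcLeaf_zero (p : List Char) : ∀ (l : List Char),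
    pvProcLeaf p l [] 0 =
      match pvSplitChar ':' p with
      | [a, b] => some (String.ofList (PySem.Chars.strip (l ++ a)), String.ofList (PySem.Chars.strip b))
      | _ => none := by
  induction p with
  | nil => intro l; simp [pvProcLeaf, pvSplitChar]
  | cons c p ih =>
    intro l
    obtain ⟨h0, t0, hr⟩ : ∃ h0 t0, pvSplitChar ':' p = h0 :: t0 := by
      cases hcase : pvSplitChar ':' p with
      | nil => exact absurd hcase (pvSplitChar_ne_nil ':' p)
      | cons a b => exact ⟨a, b, rfl⟩
    by_cases hc : c = ':'
    · subst hc
      have hstep : pvProcLeaf (':' :: p) l [] 0 = pvProcLeaf p l [] 1 := by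
        simp [pvProcLeaf]
      rw [hstep, pvProcLeaf_one]
      simp only [pvSplitChar, if_pos rfl, hr]
      cases t0 <;> simp [hr]
    · have hstep : pvProcLeaf (c :: p) l [] 0 = pvProcLeaf p (l ++ [c]) [] 0 := by
        simp [pvProcLeaf, hc]
      rw [hstep, ih]
      simp only [pvSplitChar, hr, if_neg hc, List.headI_cons, List.tail_cons]
      rcases t0 with _ | ⟨b, _ | _⟩ <;> simp [hr, List.append_assoc]

theorem pvProcLeaf_emit (p : List Char) : pvProcLeaf p [] [] 0 = pvEmit p := by
  rw [pvProcLeaf_zero, pvEmit]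
  rcases pvSplitChar ':' p with _ | ⟨a, _ | ⟨b, _ | _⟩⟩ <;> simp

theorem pvToList_flush (l r : List Char) (n : Nat) :
    (pvProcLeaf [] l r n).toList = pvFlush [] l r n := by
  simp only [pvProcLeaf, pvFlush]
  split <;> simp

theorem pvRun_eq (cs : List Char) : ∀ (l r : List Char) (n : Nat),
    pvRun cs l r n =
      (pvProcLeaf (pvSplitAny cs).headI l r n).toList ++
        ((pvSplitAny cs).tail.filterMap pvEmit) := by
  induction cs with
  | nil =>
    intro l r n
    simp only [pvSplitAny, List.headI_cons, List.tail_cons, List.filterMap_nil,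
      List.append_nil, pvRun, pvToList_flush]
  | cons c cs ih =>
    intro l r n
    obtain ⟨h0, t0, hr⟩ : ∃ h0 t0, pvSplitAny cs = h0 :: t0 := by
      cases hcase : pvSplitAny cs with
      | nil => exact absurd hcase (pvSplitAny_ne_nil cs)
      | cons a b => exact ⟨a, b, rfl⟩
    by_cases h1 : c = ',' ∨ c = ';'
    · have hsA : pvSplitAny (c :: cs) = [] :: h0 :: t0 := by simp [pvSplitAny, hr, h1]
      have hstep : pvRun (c :: cs) l r n = pvFlush [] l r n ++ pvRun cs [] [] 0 := by
        simp [pvRun, h1]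
      rw [hstep, ih, hr, hsA]
      simp only [List.headI_cons, List.tail_cons, List.filterMap_cons, ← pvProcLeaf_emit,
        pvToList_flush]
      cases pvProcLeaf h0 [] [] 0 <;> simp
    · have hsA : pvSplitAny (c :: cs) = (c :: h0) :: t0 := by simp [pvSplitAny, hr, h1]
      rw [hsA]
      simp only [List.headI_cons, List.tail_cons]
      by_cases h2 : c = ':'
      · subst h2
        have hstep : pvRun (':' :: cs) l r n = pvRun cs l r (n + 1) := by
          simp [pvRun, h1]
        have hp : pvProcLeaf (':' :: h0) l r n = pvProcLeaf h0 l r (n + 1) := by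
          simp [pvProcLeaf]
        rw [hstep, ih, hr, hp]
        simp
      · rcases n with _ | _ | n
        · have hstep : pvRun (c :: cs) l r 0 = pvRun cs (l ++ [c]) r 0 := by
            simp [pvRun, h1, h2]
          have hp : pvProcLeaf (c :: h0) l r 0 = pvProcLeaf h0 (l ++ [c]) r 0 := by
            simp [pvProcLeaf, h2]
          rw [hstep, ih, hr, hp]
          simp
        · have hstep : pvRun (c :: cs) l r 1 = pvRun cs l (r ++ [c]) 1 := by
            simp [pvRun, h1, h2]
          have hp : pvProcLeaf (c :: h0) l r 1 = pvProcLeaf h0 l (r ++ [c]) 1 := by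
            simp [pvProcLeaf, h2]
          rw [hstep, ih, hr, hp]
          simp
        · have hstep : pvRun (c :: cs) l r (n + 2) = pvRun cs l r (n + 2) := by
            simp [pvRun, h1, h2]
          have hp : pvProcLeaf (c :: h0) l r (n + 2) = pvProcLeaf h0 l r (n + 2) := by
            simp [pvProcLeaf, h2]
          rw [hstep, ih, hr, hp]
          simp

-- ===== VERDICT (by name: the statement is the Claim_ definition above) =====
theorem split_input_list_tuple_item_from_str_spec : Claim_equal_split_input_list_tuple_item_from_str := by
  intro value _
  unfold Spec_split_input_list_tuple_item_from_str
  cases value with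
  | none => rfl
  | some v =>
    simp only [split_input_list_tuple_item_from_str, split_input_list_tuple_item_from_str_alt,
      splitOn_single]
    rw [foldl_pvStep, pvRun_eq, ← List.foldl_flatMap, flatMap_splitChar, foldl_inner]
    obtain ⟨h0, t0, hr⟩ : ∃ h0 t0, pvSplitAny (PySem.Chars.strip v.toList) = h0 :: t0 := by
      cases hcase : pvSplitAny (PySem.Chars.strip v.toList) with
      | nil => exact absurd hcase (pvSplitAny_ne_nil _)
      | cons a b => exact ⟨a, b, rfl⟩
    rw [hr]
    simp only [List.headI_cons, List.tail_cons, List.filterMap_cons, pvProcLeaf_emit]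
    cases pvEmit h0 <;> simp
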